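-- pv_equiv track=rewrite | github.com/cycoe/shred_recovery | main.py | get_longests
-- ===== SOURCE A (Python) =====
-- def get_longests(item_list, num):
--     """
--     获得列表中最长的几个元素列表
--     :param item_list: <list> 待处理的元素列表
--     :param num: <int> 取前 num 个最长元素
--     :return: <list> 筛选过的元素列表
--     """
--     # 列表总长
--     total_num = len(item_list)
--     # 元素长度列表
--     length_ = [len(item) for item in item_list]
--
--     # 如果列表的长度不比 num 大，则无需处理
--     if total_num <= num:
--         return item_list
--
--     for cycoe in range(total_num - num):
--         index = length_.index(min(length_))
--         del item_list[index]
--         del length_[index]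
--
--     return item_list
-- ===== SOURCE B (Python) =====
-- def get_longests(item_list, num):
--     n = len(item_list)
--     if n <= num:
--         return item_list
--     # one stable sort of (index, item) pairs by (length, index); drop the n-num smallest
--     order = sorted(enumerate(item_list), key=lambda p: (len(p[1]), p[0]))
--     drop = set(i for i, _ in order[:n - num])
--     item_list[:] = [s for i, s in enumerate(item_list) if i not in drop]
--     return item_list
-- ===== Notes on version B (the rewrite author's own statement) =====
-- stated objective: faster
-- what changed: A repeatedly scans the remaining lengths for min() and .index() and deletes one element per pass (O(n*(n-num))); B does one stable sort of (index,item) pairs by (length,index), drops the n-num smallest, and rebuilds the list in one filtering pass (O(n log n)).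
import Mathlib
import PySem

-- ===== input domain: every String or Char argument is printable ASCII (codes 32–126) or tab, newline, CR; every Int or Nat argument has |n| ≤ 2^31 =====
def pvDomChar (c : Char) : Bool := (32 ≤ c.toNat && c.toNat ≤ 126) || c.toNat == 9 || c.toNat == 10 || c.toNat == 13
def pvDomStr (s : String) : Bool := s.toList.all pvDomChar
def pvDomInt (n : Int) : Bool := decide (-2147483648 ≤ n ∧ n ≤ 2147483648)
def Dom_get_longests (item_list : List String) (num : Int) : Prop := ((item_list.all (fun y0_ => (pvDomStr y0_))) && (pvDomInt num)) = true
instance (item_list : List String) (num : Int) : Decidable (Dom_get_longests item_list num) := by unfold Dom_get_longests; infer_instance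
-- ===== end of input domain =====

-- B replaces A's repeated min()/index()/delete passes by one sort of (index,item) pairs by
-- (length,index) plus a single filtering pass (objective: faster; both Pythons mutate
-- item_list in place to the same final content, the theorems are about the return value).


-- ===== PORT A =====
-- the for-loop over range(total_num - num): each pass takes min(length_), its first index,
-- and deletes that position from both lists; `none` from min?/index? is Python's ValueError
-- (unreachable when 0 ≤ num, see Pre_)
def aLoop : Nat → List String → List Int → List String × List Int
  | 0, items, lens => (items, lens)
  | k + 1, items, lens =>
    match PySem.List.min? lens id with
    | none => (items, lens)        -- min([]) raises ValueError in Python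
    | some m =>
      match PySem.List.index? lens m with
      | none => (items, lens)      -- unreachable (m ∈ lens)
      | some i => aLoop k (items.eraseIdx i) (lens.eraseIdx i)

def get_longests (item_list : List String) (num : Int) : List String :=
  let total_num : Int := item_list.length
  let length_ : List Int := item_list.map PySem.Str.len
  if total_num ≤ num then item_list
  else (aLoop (total_num - num).toNat item_list length_).1

-- ===== PORT B =====
-- Python's tuple key (len(p[1]), p[0]) compares lexicographically: ported as a `toLex` key
def get_longests_alt (item_list : List String) (num : Int) : List String :=
  let n : Int := item_list.length
  if n ≤ num then item_list
  else
    let order := PySem.List.sorted (PySem.List.enumerate item_list)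
      (fun p => toLex (PySem.Str.len p.2, p.1))
    let drop := PySem.Set.ofList ((order.take (n - num).toNat).map Prod.fst)
    ((PySem.List.enumerate item_list).filter (fun p => !(PySem.Set.contains drop p.1))).map Prod.snd

-- ===== PRECONDITION & SPEC =====
-- Pre_ excludes exactly num < 0: there A's loop runs more than len(item_list) times and
-- min() of the emptied length list raises ValueError.
def Pre_get_longests (item_list : List String) (num : Int) : Prop := 0 ≤ num
instance (item_list : List String) (num : Int) : Decidable (Pre_get_longests item_list num) := by unfold Pre_get_longests; infer_instance
def pvWitness_get_longests : List String × Int := (["ab", "c", "xyz"], 2)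

def Spec_get_longests (item_list : List String) (num : Int) (out : List String) : Prop := out = get_longests_alt item_list num
instance (item_list : List String) (num : Int) (out : List String) : Decidable (Spec_get_longests item_list num out) := by unfold Spec_get_longests; infer_instance

-- ===== CLAIM (what is proved, stated in full; the proofs are below) =====
def Claim_equal_get_longests : Prop := ∀ (item_list : List String) (num : Int), Dom_get_longests item_list num → Pre_get_longests item_list num → Spec_get_longests item_list num (get_longests item_list num)

-- ===== LEMMAS AND PROOFS =====

-- the lexicographic sort key of B
def bKey (p : Int × String) : Lex (Int × Int) := toLex (PySem.Str.len p.2, p.1)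

-- the length of a pair's string, as tracked by A's parallel list `length_`
def lenK (p : Int × String) : Int := PySem.Str.len p.2

theorem eraseIdx_append_len {α : Type} (xs ys : List α) (a : α) :
    (xs ++ a :: ys).eraseIdx xs.length = xs ++ ys := by
  induction xs with
  | nil => simp
  | cons x xs ih => simp [ih]

-- MAIN INVARIANT: running A's loop k times on the survivors P (pairs with their original
-- enumerate indices, strictly increasing) deletes exactly the pairs in the first k of the
-- bKey-sorted order O.
theorem aLoop_eq_filter : ∀ (k : Nat) (P O : List (Int × String)),
    k ≤ P.length →
    O.Perm P →
    O.Pairwise (fun a b => bKey a < bKey b) →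
    P.Pairwise (fun a b => a.1 < b.1) →
    aLoop k (P.map Prod.snd) (P.map lenK)
      = ((P.filter (fun p => !(((O.take k).map Prod.fst).contains p.1))).map Prod.snd,
         (P.filter (fun p => !(((O.take k).map Prod.fst).contains p.1))).map lenK) := by
  intro k
  induction k with
  | zero => intro P O _ _ _ _; simp [aLoop]
  | succ k ih =>
    intro P O hk hperm hO hP
    match O, hO with
    | [], _ => exact absurd (hperm.length_eq) (by simp; omega)
    | o :: O', hO =>
    -- o is the lexicographic minimum of the survivors
    have hOmem : ∀ p ∈ P, bKey o ≤ bKey p := by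
      intro p hp
      have hpo : p ∈ o :: O' := hperm.mem_iff.mpr hp
      rcases List.mem_cons.mp hpo with h | h
      · exact le_of_eq (congrArg bKey h.symm)
      · exact le_of_lt (List.rel_of_pairwise_cons hO h)
    have homem : o ∈ P := hperm.mem_iff.mp (by simp)
    obtain ⟨pre, suf, hsplit⟩ := List.append_of_mem homem
    subst hsplit
    have hPparts := List.pairwise_append.mp hP
    have hpre_lt : ∀ p ∈ pre, p.1 < o.1 := fun p hp => hPparts.2.2 p hp o (by simp)
    have hsuf_lt : ∀ p ∈ suf, o.1 < p.1 := fun p hp => List.rel_of_pairwise_cons hPparts.2.1 hp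
    -- strings before o are strictly longer than o's
    have hpre_len : ∀ p ∈ pre, lenK o < lenK p := by
      intro p hp
      have hle := hOmem p (by simp [hp])
      rcases Prod.Lex.le_iff.mp hle with h | ⟨h1, h2⟩
      · exact h
      · exact absurd h2 (by simpa using not_le.mpr (hpre_lt p hp))
    -- min() of the length list is o's length
    have hmin : PySem.List.min? ((pre ++ o :: suf).map lenK) (id : Int → Int) = some (lenK o) := by
      rcases h : PySem.List.min? ((pre ++ o :: suf).map lenK) (id : Int → Int) with _ | m
      · rw [PySem.List.min?_eq_none_iff] at h; simp at h
      · have hmem := PySem.List.min?_mem h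
        have hisMin := PySem.List.min?_isMin h
        obtain ⟨q, hq, hqm⟩ := List.mem_map.mp hmem
        have h1 : m ≤ lenK o := hisMin (lenK o) (List.mem_map.mpr ⟨o, by simp, rfl⟩)
        have h2 : lenK o ≤ m := by
          have := hOmem q hq
          rcases Prod.Lex.le_iff.mp this with h | ⟨h', _⟩
          · exact hqm ▸ le_of_lt h
          · exact hqm ▸ le_of_eq h'
        rw [le_antisymm h1 h2]
    -- .index() finds o's position pre.length (everything before is strictly longer)
    have hidx : PySem.List.index? ((pre ++ o :: suf).map lenK) (lenK o) = some pre.length := by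
      rw [PySem.List.index?_eq_some_iff]
      refine ⟨pre.map lenK, suf.map lenK, by simp, by simp, ?_⟩
      intro hmem
      obtain ⟨q, hq, hqm⟩ := List.mem_map.mp hmem
      exact absurd hqm (ne_of_gt (hpre_len q hq))
    -- one loop pass deletes o
    have hstep : aLoop (k + 1) ((pre ++ o :: suf).map Prod.snd) ((pre ++ o :: suf).map lenK)
        = aLoop k ((pre ++ suf).map Prod.snd) ((pre ++ suf).map lenK) := by
      rw [aLoop, hmin]
      dsimp only
      rw [hidx]
      dsimp only
      have e0 : (pre ++ o :: suf).eraseIdx pre.length = pre ++ suf := eraseIdx_append_len pre suf o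
      rw [List.eraseIdx_map, List.eraseIdx_map, e0]
    rw [hstep]
    -- induction hypothesis on the remaining survivors and the sorted tail
    have hperm' : O'.Perm (pre ++ suf) := (hperm.trans List.perm_middle).cons_inv
    have hlen' : k ≤ (pre ++ suf).length := by
      have := hperm'.length_eq
      have h2 := hperm.length_eq
      simp only [List.length_append, List.length_cons] at hk ⊢
      omega
    have hP' : (pre ++ suf).Pairwise (fun a b => a.1 < b.1) :=
      hP.sublist ((List.sublist_cons_self o suf).append_left pre)
    rw [ih (pre ++ suf) O' hlen' hperm' (List.pairwise_cons.mp hO).2 hP']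
    -- deleting o = filtering its (unique) index out
    have hfeq : (pre ++ o :: suf).filter (fun p => !((((o :: O').take (k+1)).map Prod.fst).contains p.1))
        = (pre ++ suf).filter (fun p => !(((O'.take k).map Prod.fst).contains p.1)) := by
      simp only [List.take_succ_cons, List.map_cons, List.filter_append, List.filter_cons]
      have hfo : (!((o.1 :: (O'.take k).map Prod.fst).contains o.1)) = false := by
        simp
      rw [hfo]
      have hcongr : ∀ L : List (Int × String), (∀ p ∈ L, p.1 ≠ o.1) →
          L.filter (fun p => !((o.1 :: (O'.take k).map Prod.fst).contains p.1))
          = L.filter (fun p => !(((O'.take k).map Prod.fst).contains p.1)) := by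
        intro L hL
        apply List.filter_congr
        intro p hp
        simp [hL p hp]
      rw [hcongr pre (fun p hp => ne_of_lt (hpre_lt p hp)),
          hcongr suf (fun p hp => ne_of_gt (hsuf_lt p hp))]
      simp
    rw [hfeq]

theorem ab_eq (l : List String) (num : Int) (hpre : 0 ≤ num) :
    get_longests l num = get_longests_alt l num := by
  unfold get_longests get_longests_alt
  simp only []
  split_ifs with h
  · rfl
  · set n : Int := (l.length : Int) with hn
    set k : Nat := (n - num).toNat with hkdef
    set E : List (Int × String) := PySem.List.enumerate l with hE
    have hkeyeq : (fun p : Int × String => toLex (PySem.Str.len p.2, p.1)) = bKey := rfl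
    rw [hkeyeq]
    set O : List (Int × String) := PySem.List.sorted E bKey with hO
    have hEp : E.Pairwise (fun a b => a.1 < b.1) := PySem.List.pairwise_lt_enumerate l 0
    have hpermO : O.Perm E := PySem.List.sorted_perm E bKey false
    have hOle : O.Pairwise (fun a b => bKey a ≤ bKey b) := PySem.List.sorted_pairwise E bKey
    have hEne : E.Pairwise (fun a b => bKey a ≠ bKey b) := by
      refine hEp.imp ?_
      intro a b hab heq
      have : a.1 = b.1 := congrArg (fun x => (ofLex x).2) heq
      omega
    have hne : O.Pairwise (fun a b => bKey a ≠ bKey b) :=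
      (List.Perm.pairwise_iff (R := fun a b : Int × String => bKey a ≠ bKey b)
        (fun hab he => hab he.symm) hpermO).mpr hEne
    have hOlt : O.Pairwise (fun a b => bKey a < bKey b) :=
      (hOle.and hne).imp (fun hab => lt_of_le_of_ne hab.1 hab.2)
    have hklen : k ≤ E.length := by
      have : E.length = l.length := PySem.List.length_enumerate l 0
      rw [this]
      omega
    have hmapsnd : E.map Prod.snd = l := PySem.List.map_snd_enumerate l 0
    have hmaplen : E.map lenK = l.map PySem.Str.len := by
      have : lenK = PySem.Str.len ∘ Prod.snd := rfl
      rw [this, ← List.map_map, hmapsnd]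
    have hmain := aLoop_eq_filter k E O hklen hpermO hOlt hEp
    rw [← hmaplen, ← hmapsnd, hmain]
    set D : List Int := (O.take k).map Prod.fst with hD
    have hfc : E.filter (fun p => !(PySem.Set.contains (PySem.Set.ofList D) p.1))
        = E.filter (fun p => !(D.contains p.1)) := by
      apply List.filter_congr
      intro p _
      have hc : PySem.Set.contains (PySem.Set.ofList D) p.1 = D.contains p.1 := by
        by_cases hx : p.1 ∈ D
        · simp [PySem.Set.mem_ofList, hx]
        · simp [PySem.Set.mem_ofList, hx]
      rw [hc]
    rw [hfc]

-- ===== VERDICT (by name: the statement is the Claim_ definition above) =====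
theorem get_longests_spec : Claim_equal_get_longests := by
  intro l num _ hpre
  exact ab_eq l num hpre
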